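-- pv_equiv track=rewrite | github.com/codesedoc/LSSE | utils/data_tool.py | divide_part_of_classification
-- ===== SOURCE A (Python) =====
-- def divide_part_of_classification(classification_dicts, k_part):
--     count = len(classification_dicts)
--     result = [[] for k in range(k_part)]
--     for i in range(count):
--         result[i % k_part].append(classification_dicts[i])
--     for i in range(k_part):
--         if len(result[i]) == 0:
--             raise ValueError
--     return result
-- ===== SOURCE B (Python) =====
-- def divide_part_of_classification(classification_dicts, k_part):
--     parts = [classification_dicts[j::k_part] for j in range(k_part)]
--     for part in parts:
--         if not part:
--             raise ValueError
--     return parts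
-- ===== Notes on version B (the rewrite author's own statement) =====
-- stated objective: alternative
-- what changed: Instead of scanning every item and scattering it into bucket i % k_part of a mutable list of k parts, B builds each part directly in one strided slice classification_dicts[j::k_part] per part, then validates; return value is identical wherever A returns.
import Mathlib
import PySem

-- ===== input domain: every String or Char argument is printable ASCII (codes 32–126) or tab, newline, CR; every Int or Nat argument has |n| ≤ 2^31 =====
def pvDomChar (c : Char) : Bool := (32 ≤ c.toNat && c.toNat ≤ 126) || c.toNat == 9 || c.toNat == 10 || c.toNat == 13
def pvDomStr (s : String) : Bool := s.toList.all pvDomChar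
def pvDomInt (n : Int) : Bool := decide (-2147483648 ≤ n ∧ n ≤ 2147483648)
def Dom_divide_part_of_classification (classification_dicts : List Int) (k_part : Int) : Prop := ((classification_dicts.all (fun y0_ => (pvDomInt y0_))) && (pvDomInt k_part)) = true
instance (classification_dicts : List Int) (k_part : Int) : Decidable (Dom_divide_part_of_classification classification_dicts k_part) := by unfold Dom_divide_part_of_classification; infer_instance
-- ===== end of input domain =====

-- B replaces A's scatter loop (append item i to bucket i % k_part) by gathering each part
-- directly with one strided slice xs[j::k_part] per part; same return value wherever A returns.

-- ===== PORT A =====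
-- literal port of A: k_part empty buckets, scatter classification_dicts[i] into bucket i % k_part,
-- then a validation pass; the 'raise ValueError' (some bucket empty) is excluded by Pre_ and modelled as [].
def divide_part_of_classification (classification_dicts : List Int) (k_part : Int) : List (List Int) :=
  let count : Int := classification_dicts.length
  let result0 : List (List Int) := (PySem.List.pyRange 0 k_part 1).map (fun _ => [])
  let result := (PySem.List.pyRange 0 count 1).foldl
    (fun res i => res.modify (PySem.Int.mod i k_part).toNat
      (fun b => b ++ [PySem.List.pyGetD classification_dicts i 0])) result0
  if (PySem.List.pyRange 0 k_part 1).any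
      (fun i => (PySem.List.pyGetD result i []).length == 0) then [] -- raise ValueError (outside Pre_)
  else result

-- ===== PORT B =====
-- literal port of B: one strided slice per part, then validation; inside the comprehension the
-- step k_part is nonzero (the range is nonempty), so slice? is some; 'raise ValueError' outside Pre_ → [].
def divide_part_of_classification_alt (classification_dicts : List Int) (k_part : Int) : List (List Int) :=
  let parts := (PySem.List.pyRange 0 k_part 1).map
    (fun j => (PySem.List.slice? classification_dicts (some j) none k_part).getD [])
  if parts.any (fun p => p.isEmpty) then [] -- raise ValueError (outside Pre_)
  else parts

-- ===== PRECONDITION & SPEC =====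
-- Pre_ is exactly where A returns: k_part ≤ 0 raises ZeroDivisionError/IndexError unless the list is
-- empty, and 0 < k_part needs k_part ≤ len so that no bucket is empty (else ValueError).
def Pre_divide_part_of_classification (classification_dicts : List Int) (k_part : Int) : Prop :=
  (k_part ≤ 0 ∧ classification_dicts = []) ∨
  (0 < k_part ∧ k_part ≤ classification_dicts.length)
instance (classification_dicts : List Int) (k_part : Int) : Decidable (Pre_divide_part_of_classification classification_dicts k_part) := by unfold Pre_divide_part_of_classification; infer_instance

def pvWitness_divide_part_of_classification : List Int × Int := ([1, 2, 3], 2)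

def Spec_divide_part_of_classification (classification_dicts : List Int) (k_part : Int) (out : List (List Int)) : Prop := out = divide_part_of_classification_alt classification_dicts k_part
instance (classification_dicts : List Int) (k_part : Int) (out : List (List Int)) : Decidable (Spec_divide_part_of_classification classification_dicts k_part out) := by unfold Spec_divide_part_of_classification; infer_instance

-- ===== CLAIM (what is proved, stated in full; the proofs are below) =====
def Claim_equal_divide_part_of_classification : Prop := ∀ (classification_dicts : List Int) (k_part : Int), Dom_divide_part_of_classification classification_dicts k_part → Pre_divide_part_of_classification classification_dicts k_part → Spec_divide_part_of_classification classification_dicts k_part (divide_part_of_classification classification_dicts k_part)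

-- ===== LEMMAS AND PROOFS =====

-- elements of xs at the indices < i that are ≡ j (mod k'): the j-th bucket after A has scattered
-- the first i items, and also the strided slice xs[j::k'] when i = xs.length
def pvGather (xs : List Int) (k' j i : Nat) : List Int :=
  ((List.range i).filter (fun m => m % k' = j)).map (fun m => xs.getD m 0)

-- the indices < i that are ≡ j (mod k') are j, j+k', …, and there are (i + (k'-1) - j)/k' of them
lemma pv_filter_range (k' j : Nat) (hk : 0 < k') (hj : j < k') : ∀ i : Nat,
    (List.range i).filter (fun m => m % k' = j) =
      (List.range ((i + (k' - 1) - j) / k')).map (fun t => j + k' * t) := by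
  intro i
  induction i with
  | zero =>
    rw [Nat.div_eq_of_lt (by omega : 0 + (k' - 1) - j < k')]
    simp
  | succ i ih =>
    obtain ⟨q, r, hqr, hr⟩ : ∃ q r, i = k' * q + r ∧ r < k' :=
      ⟨i / k', i % k', by rw [Nat.div_add_mod], Nat.mod_lt _ hk⟩
    have hmod : i % k' = r := by
      rw [hqr, Nat.add_comm, Nat.add_mul_mod_self_left, Nat.mod_eq_of_lt hr]
    rw [List.range_succ, List.filter_append, ih]
    by_cases h : r = j
    · have hmul : k' * (q + 1) = k' * q + k' := by ring
      have hcnt : (i + (k' - 1) - j) / k' = q := by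
        have h0 : i + (k' - 1) - j = (k' - 1) + k' * q := by omega
        rw [h0, Nat.add_mul_div_left _ _ hk, Nat.div_eq_of_lt (by omega : k' - 1 < k'),
          Nat.zero_add]
      have hcnt1 : ((i + 1) + (k' - 1) - j) / k' = q + 1 := by
        have h0 : (i + 1) + (k' - 1) - j = 0 + k' * (q + 1) := by omega
        rw [h0, Nat.add_mul_div_left _ _ hk, Nat.div_eq_of_lt (by omega : 0 < k'),
          Nat.zero_add]
      have hfil : (List.filter (fun m => decide (m % k' = j)) [i]) = [i] := by
        simp [hmod, h]
      rw [hfil, hcnt, hcnt1, List.range_succ, List.map_append]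
      have hlast : j + k' * q = i := by omega
      simp [hlast]
    · have hmul : k' * (q + 1) = k' * q + k' := by ring
      have hcnt : ((i + 1) + (k' - 1) - j) / k' = (i + (k' - 1) - j) / k' := by
        by_cases hrj : r < j
        · have h0 : i + (k' - 1) - j = (r + (k' - 1) - j) + k' * q := by omega
          have h1 : (i + 1) + (k' - 1) - j = (r + 1 + (k' - 1) - j) + k' * q := by omega
          rw [h0, h1, Nat.add_mul_div_left _ _ hk, Nat.add_mul_div_left _ _ hk,
            Nat.div_eq_of_lt (by omega), Nat.div_eq_of_lt (by omega)]
        · have h0 : i + (k' - 1) - j = (r - j - 1) + k' * (q + 1) := by omega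
          have h1 : (i + 1) + (k' - 1) - j = (r - j) + k' * (q + 1) := by omega
          rw [h0, h1, Nat.add_mul_div_left _ _ hk, Nat.add_mul_div_left _ _ hk,
            Nat.div_eq_of_lt (by omega), Nat.div_eq_of_lt (by omega)]
      have hfil : (List.filter (fun m => decide (m % k' = j)) [i]) = [] := by
        simp [hmod]; omega
      rw [hfil, hcnt]
      simp

lemma pv_gather_succ (xs : List Int) (k' j i : Nat) :
    pvGather xs k' j (i + 1) =
      if j = i % k' then pvGather xs k' j i ++ [xs.getD i 0] else pvGather xs k' j i := by
  unfold pvGather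
  rw [List.range_succ, List.filter_append, List.map_append]
  by_cases h : i % k' = j <;> simp [h] <;> omega

lemma pv_map_range_modify {α : Type} (g : Nat → α) (f : α → α) (K p : Nat) (hp : p < K) :
    ((List.range K).map g).modify p f = (List.range K).map (fun j => if j = p then f (g j) else g j) := by
  apply List.ext_getElem
  · simp
  · intro m h1 h2
    have hm : m < K := by simpa using h2
    rw [List.getElem_modify]
    simp only [List.getElem_map, List.getElem_range]
    by_cases h : m = p <;> simp [h]
    omega

-- if f is some ∘ g on every element, filterMap f = map g
lemma pv_filterMap_eq_map {α β : Type} (l : List α) (f : α → Option β) (g : α → β)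
    (h : ∀ a ∈ l, f a = some (g a)) : l.filterMap f = l.map g := by
  induction l with
  | nil => rfl
  | cons a l ih =>
    rw [List.map_cons, List.filterMap_cons, h a (by simp)]
    rw [ih (fun a ha => h a (by simp [ha]))]

-- A's scatter loop, processed up to i, equals the k' gathered buckets
lemma pv_fold_eq (xs : List Int) (k' : Nat) (hk : 0 < k') : ∀ i : Nat,
    ((List.range i).map (fun t : Nat => (t : Int))).foldl
      (fun res m => res.modify (PySem.Int.mod m (k' : Int)).toNat
        (fun b => b ++ [PySem.List.pyGetD xs m 0]))
      ((List.range k').map (fun _ => ([] : List Int)))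
    = (List.range k').map (fun j => pvGather xs k' j i) := by
  intro i
  induction i with
  | zero => simp [pvGather]
  | succ i ih =>
    rw [List.range_succ, List.map_append, List.foldl_append, ih]
    simp only [List.map_cons, List.map_nil, List.foldl_cons, List.foldl_nil]
    have hmod : (PySem.Int.mod (i : Int) (k' : Int)).toNat = i % k' := by
      rw [PySem.Int.mod_eq_emod_of_pos (by exact_mod_cast hk : (0:Int) < (k':Int))]
      omega
    have hget : PySem.List.pyGetD xs (i : Int) 0 = xs.getD i 0 := by
      simp [PySem.List.pyGetD_natCast]
    rw [hmod, hget, pv_map_range_modify _ _ _ _ (Nat.mod_lt _ hk)]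
    apply List.map_congr_left
    intro j _
    rw [pv_gather_succ]

-- the computed slice indices of xs[j::k'] (0 ≤ j < len xs, step k' > 0)
lemma pv_si (xs : List Int) (k' j : Nat) (hk : 0 < k') (hjn : j < xs.length) :
    PySem.List.sliceIndices xs.length (some (j:Int)) none (k':Int)
      = ((j:Int), (xs.length:Int), (k':Int)) := by
  simp only [PySem.List.sliceIndices]
  rw [if_neg (by omega : ¬((k':Int) < 0)), if_neg (by omega : ¬((k':Int) < 0)),
    if_neg (by omega : ¬((k':Int) < 0)), if_neg (by omega : ¬((j:Int) < 0))]
  rw [min_eq_left (by exact_mod_cast hjn.le : (j:Int) ≤ (xs.length:Int))]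

-- B's strided slice xs[j::k'] is the gathered bucket j (for 0 ≤ j < k' ≤ len xs)
lemma pv_slice_eq (xs : List Int) (k' j : Nat) (hk : 0 < k') (hj : j < k')
    (hkn : k' ≤ xs.length) :
    PySem.List.slice? xs (some (j : Int)) none (k' : Int) = some (pvGather xs k' j xs.length) := by
  have hjn : j < xs.length := lt_of_lt_of_le hj hkn
  rw [PySem.List.slice?, if_neg (by exact_mod_cast hk.ne' : ¬((k':Int) = 0)),
    pv_si xs k' j hk hjn]
  dsimp only
  rw [if_pos (by exact_mod_cast hk : (0:Int) < (k':Int)),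
    if_pos (by exact_mod_cast hjn : (j:Int) < (xs.length:Int))]
  have hcnt : (((xs.length : Int) - (j : Int) + (k' : Int) - 1) / (k' : Int)).toNat
      = (xs.length + (k' - 1) - j) / k' := by
    have h1 : (xs.length : Int) - (j : Int) + (k' : Int) - 1
        = ((xs.length + (k' - 1) - j : Nat) : Int) := by omega
    rw [h1, ← Int.natCast_div]
    norm_cast
  rw [hcnt]
  congr 1
  have hcntle : k' * ((xs.length + (k' - 1) - j) / k') ≤ xs.length + (k' - 1) - j :=
    Nat.mul_div_le _ _
  rw [pv_filterMap_eq_map _ _ (fun t => xs.getD (j + k' * t) 0)]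
  · unfold pvGather
    rw [pv_filter_range k' j hk hj, List.map_map]
    rfl
  · intro t ht
    have htc : t < (xs.length + (k' - 1) - j) / k' := by simpa using ht
    have hlt : j + k' * t < xs.length := by
      have h3 : k' * (t + 1) ≤ k' * ((xs.length + (k' - 1) - j) / k') :=
        Nat.mul_le_mul_left _ htc
      have h5 : k' * (t + 1) = k' * t + k' := by ring
      omega
    have h2 : ((j : Int) + (k' : Int) * (t : Int)).toNat = j + k' * t := by omega
    rw [h2, List.getElem?_eq_getElem (by omega), List.getD_eq_getElem _ _ (by omega)]

-- bucket j is nonempty when j < k' ≤ len xs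
lemma pv_gather_ne_nil (xs : List Int) (k' j : Nat) (hk : 0 < k') (hj : j < k')
    (hkn : k' ≤ xs.length) : pvGather xs k' j xs.length ≠ [] := by
  unfold pvGather
  intro h
  rw [List.map_eq_nil_iff, List.filter_eq_nil_iff] at h
  have := h j (by simp; omega)
  simp [Nat.mod_eq_of_lt hj] at this

-- range(b) in Python index form
lemma pv_pyRange_cast (b : Nat) :
    PySem.List.pyRange 0 (b : Int) 1 = (List.range b).map (fun t : Nat => (t : Int)) := by
  rw [PySem.List.pyRange_one]
  simp

-- ===== VERDICT (by name: the statement is the Claim_ definition above) =====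
theorem divide_part_of_classification_spec : Claim_equal_divide_part_of_classification := by
  intro xs k _ hpre
  unfold Spec_divide_part_of_classification
  rcases hpre with ⟨hk0, hnil⟩ | ⟨hkpos, hkle⟩
  · subst hnil
    simp [divide_part_of_classification, divide_part_of_classification_alt,
      PySem.List.pyRange_one_eq_nil hk0]
  · obtain ⟨k', rfl⟩ : ∃ k' : Nat, k = (k' : Int) := ⟨k.toNat, by omega⟩
    have hk : 0 < k' := by exact_mod_cast hkpos
    have hkn : k' ≤ xs.length := by exact_mod_cast hkle
    have hne : ∀ j < k', pvGather xs k' j xs.length ≠ [] :=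
      fun j hj => pv_gather_ne_nil xs k' j hk hj hkn
    have hinit : ((List.range k').map (fun t : Nat => (t : Int))).map (fun _ => ([] : List Int))
        = (List.range k').map (fun _ => ([] : List Int)) := by
      rw [List.map_map]; rfl
    have hanyA : (((List.range k').map (fun t : Nat => (t : Int))).any
        (fun i => (PySem.List.pyGetD ((List.range k').map (fun j => pvGather xs k' j xs.length)) i []).length == 0)) = false := by
      rw [List.any_eq_false]
      intro i hi
      obtain ⟨i', hi', rfl⟩ := List.mem_map.mp hi
      have hik : i' < k' := List.mem_range.mp hi'
      rw [PySem.List.pyGetD_natCast, List.getD_eq_getElem _ _ (by simpa using hik)]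
      simp only [List.getElem_map, List.getElem_range]
      simpa using hne i' hik
    have hAval : divide_part_of_classification xs (k' : Int)
        = (List.range k').map (fun j => pvGather xs k' j xs.length) := by
      simp only [divide_part_of_classification]
      rw [pv_pyRange_cast k', pv_pyRange_cast xs.length, hinit, pv_fold_eq xs k' hk xs.length,
        hanyA]
      simp
    have hmapB : (List.range k').map
          ((fun j : Int => (PySem.List.slice? xs (some j) none (k' : Int)).getD []) ∘ (fun t : Nat => (t : Int)))
        = (List.range k').map (fun j => pvGather xs k' j xs.length) := by
      apply List.map_congr_left
      intro j hj
      have hjk : j < k' := List.mem_range.mp hj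
      simp only [Function.comp]
      rw [pv_slice_eq xs k' j hk hjk hkn]
      rfl
    have hanyB : (((List.range k').map (fun j => pvGather xs k' j xs.length)).any
        (fun p => p.isEmpty)) = false := by
      rw [List.any_eq_false]
      intro p hp
      obtain ⟨j, hj, rfl⟩ := List.mem_map.mp hp
      simpa using hne j (List.mem_range.mp hj)
    have hBval : divide_part_of_classification_alt xs (k' : Int)
        = (List.range k').map (fun j => pvGather xs k' j xs.length) := by
      simp only [divide_part_of_classification_alt]
      rw [pv_pyRange_cast k', List.map_map, hmapB, hanyB]
      simp
    rw [hAval, hBval]
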